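-- pv_equiv track=rewrite | github.com/tzafon/lightcone | src/lightcone/models.py | _pick_default
-- ===== SOURCE A (Python) =====
-- from typing import Iterable, Optional
--
-- def _pick_default(models: Iterable[str]) -> Optional[str]:
--     models = list(models)
--     if not models:
--         return None
--     for needle in ("cua", "agent", "vision"):
--         for model in models:
--             if needle in model.lower():
--                 return model
--     return models[0]
-- ===== SOURCE B (Python) =====
-- from typing import Iterable, Optional
--
-- def _pick_default(models: Iterable[str]) -> Optional[str]:
--     models = list(models)
--     best = None
--     best_p = 3
--     for model in models:
--         low = model.lower()
--         p = 3
--         for i, needle in enumerate(("cua", "agent", "vision")):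
--             if needle in low:
--                 p = i
--                 break
--         if p < best_p:
--             best = model
--             best_p = p
--     if best is not None:
--         return best
--     return models[0] if models else None
-- ===== Notes on version B (the rewrite author's own statement) =====
-- stated objective: alternative
-- what changed: B replaces A's needle-major double scan (one full pass over the models per priority substring) with a single pass over the models that tracks the best (lowest-priority-index) model seen so far, updating only on strictly smaller priority so the earliest model at the winning priority is returned.
import Mathlib
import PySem

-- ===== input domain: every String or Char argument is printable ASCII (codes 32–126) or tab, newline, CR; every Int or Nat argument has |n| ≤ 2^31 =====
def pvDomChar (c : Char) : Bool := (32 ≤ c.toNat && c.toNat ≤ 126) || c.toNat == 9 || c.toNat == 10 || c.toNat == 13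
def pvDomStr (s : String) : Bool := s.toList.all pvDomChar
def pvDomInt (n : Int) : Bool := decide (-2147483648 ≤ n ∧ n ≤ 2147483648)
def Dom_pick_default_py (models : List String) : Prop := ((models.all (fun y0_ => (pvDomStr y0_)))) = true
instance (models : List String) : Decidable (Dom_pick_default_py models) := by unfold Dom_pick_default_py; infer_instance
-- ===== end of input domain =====

-- B makes a single pass tracking the best-priority model instead of A's one scan of the list per needle (alternative decomposition, same result).

-- ===== PORT A =====
-- inner loop: 'for model in models: if needle in model.lower(): return model'
def pickA_scan (needle : String) (models : List String) : Option String :=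
  match models with
  | [] => none
  | m :: rest =>
    if PySem.Str.isIn needle (PySem.Str.lower m) then some m
    else pickA_scan needle rest

-- outer loop: 'for needle in ("cua", "agent", "vision"): …'
def pickA_outer (needles : List String) (models : List String) : Option String :=
  match needles with
  | [] => none
  | n :: rest =>
    match pickA_scan n models with
    | some m => some m
    | none => pickA_outer rest models

def pick_default_py (models : List String) : Option String :=
  match models with
  | [] => none
  | m0 :: _ =>
    match pickA_outer ["cua", "agent", "vision"] models with
    | some m => some m
    | none => some m0

-- ===== PORT B =====
-- 'for i, needle in enumerate(...): if needle in low: p = i; break' (p = 3 if no needle matches)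
def priB (needles : List String) (i : Nat) (low : String) : Nat :=
  match needles with
  | [] => 3
  | n :: rest => if PySem.Str.isIn n low then i else priB rest (i + 1) low

-- loop body: update (best, best_p) on strictly smaller priority
def stepB (st : Option String × Nat) (m : String) : Option String × Nat :=
  let p := priB ["cua", "agent", "vision"] 0 (PySem.Str.lower m)
  if p < st.2 then (some m, p) else st

def pick_default_py_alt (models : List String) : Option String :=
  match models.foldl stepB (none, 3) with
  | (some b, _) => some b
  | (none, _) => models.head?

-- ===== PRECONDITION & SPEC =====
def Spec_pick_default_py (models : List String) (out : Option String) : Prop := out = pick_default_py_alt models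
instance (models : List String) (out : Option String) : Decidable (Spec_pick_default_py models out) := by unfold Spec_pick_default_py; infer_instance

-- ===== CLAIM (what is proved, stated in full; the proofs are below) =====
def Claim_equal_pick_default_py : Prop := ∀ (models : List String), Dom_pick_default_py models → Spec_pick_default_py models (pick_default_py models)

-- ===== LEMMAS AND PROOFS =====

-- the priority B assigns to a model
def pr (m : String) : Nat := priB ["cua", "agent", "vision"] 0 (PySem.Str.lower m)

def cP (m : String) : Bool := PySem.Str.isIn "cua" (PySem.Str.lower m)
def aP (m : String) : Bool := PySem.Str.isIn "agent" (PySem.Str.lower m)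
def vP (m : String) : Bool := PySem.Str.isIn "vision" (PySem.Str.lower m)

def qp (i : Nat) (m : String) : Bool := pr m == i

def or3 (o1 o2 o3 : Option String) : Option String :=
  match o1 with
  | some m => some m
  | none => match o2 with
    | some m => some m
    | none => o3

-- what the fold's best component is after scanning xs with threshold q
def Bsp (q : Nat) (xs : List String) : Option String :=
  or3 (if 0 < q then xs.find? (qp 0) else none)
      (if 1 < q then xs.find? (qp 1) else none)
      (if 2 < q then xs.find? (qp 2) else none)

lemma pr_char (m : String) :
    pr m = if cP m then 0 else if aP m then 1 else if vP m then 2 else 3 := by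
  simp [pr, priB, cP, aP, vP]

lemma pr_le3 (m : String) : pr m ≤ 3 := by
  rw [pr_char]; split_ifs <;> omega

lemma stepB_eq (st : Option String × Nat) (m : String) :
    stepB st m = if pr m < st.2 then (some m, pr m) else st := rfl

lemma find?_congr_mem {α : Type} (l : List α) (p q : α → Bool)
    (h : ∀ x ∈ l, p x = q x) : l.find? p = l.find? q := by
  induction l with
  | nil => rfl
  | cons x xs ih =>
    have hx := h x (by simp)
    by_cases hp : p x = true
    · rw [List.find?_cons_of_pos hp, List.find?_cons_of_pos (hx ▸ hp)]
    · rw [List.find?_cons_of_neg hp,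
        List.find?_cons_of_neg (by rw [← hx]; exact hp)]
      exact ih (fun y hy => h y (by simp [hy]))

lemma Bsp_cons_lt (x : String) (xs : List String) (q : Nat)
    (hlt : pr x < q) (hq : q ≤ 3) :
    Bsp q (x :: xs) =
      (match Bsp (pr x) xs with
       | some m => some m
       | none => some x) := by
  have h3 : pr x = 0 ∨ pr x = 1 ∨ pr x = 2 := by
    have := pr_le3 x; omega
  rcases h3 with h | h | h
  · have hq0 : qp 0 x = true := by simp [qp, h]
    rw [Bsp, Bsp, h]
    simp only [Nat.lt_irrefl, if_pos (by omega : 0 < q)]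
    rw [List.find?_cons_of_pos hq0]
    simp [or3]
  · have hne : qp 0 x = false := by simp [qp, h]
    have heq : qp 1 x = true := by simp [qp, h]
    rw [Bsp, Bsp, h]
    simp only [if_pos (by omega : 0 < q), if_pos (by omega : 1 < q),
      if_pos (by omega : (0:Nat) < 1), if_neg (by omega : ¬ (1:Nat) < 1),
      if_neg (by omega : ¬ (2:Nat) < 1)]
    rw [List.find?_cons_of_neg (by simp [hne]), List.find?_cons_of_pos heq]
    cases xs.find? (qp 0) <;> simp [or3]
  · have hne0 : qp 0 x = false := by simp [qp, h]
    have hne1 : qp 1 x = false := by simp [qp, h]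
    have heq : qp 2 x = true := by simp [qp, h]
    have hq3 : q = 3 := by omega
    rw [Bsp, Bsp, h, hq3]
    simp only [if_pos (by omega : (0:Nat) < 3), if_pos (by omega : (1:Nat) < 3),
      if_pos (by omega : (2:Nat) < 3), if_pos (by omega : (0:Nat) < 2),
      if_pos (by omega : (1:Nat) < 2), if_neg (by omega : ¬ (2:Nat) < 2)]
    rw [List.find?_cons_of_neg (by simp [hne0]),
      List.find?_cons_of_neg (by simp [hne1]),
      List.find?_cons_of_pos heq]
    cases xs.find? (qp 0) <;> cases xs.find? (qp 1) <;> simp [or3]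

lemma Bsp_cons_ge (x : String) (xs : List String) (q : Nat)
    (hge : ¬ pr x < q) : Bsp q (x :: xs) = Bsp q xs := by
  rw [Bsp, Bsp]
  have h : ∀ i : Nat, i < q → xs.find? (qp i) = (x :: xs).find? (qp i) := by
    intro i hi
    rw [List.find?_cons_of_neg (by simp [qp]; omega)]
  congr 1
  · split_ifs with h0
    · exact (h 0 h0).symm
    · rfl
  · split_ifs with h1
    · exact (h 1 h1).symm
    · rfl
  · split_ifs with h2
    · exact (h 2 h2).symm
    · rfl

lemma fold_char (xs : List String) : ∀ (b : Option String) (q : Nat), q ≤ 3 →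
    xs.foldl stepB (b, q) =
      (match Bsp q xs with
       | some m => (some m, pr m)
       | none => (b, q)) := by
  induction xs with
  | nil => intro b q hq; simp [Bsp, or3]
  | cons x xs ih =>
    intro b q hq
    rw [List.foldl_cons, stepB_eq]
    by_cases hlt : pr x < q
    · rw [if_pos hlt, ih _ _ (by omega), Bsp_cons_lt x xs q hlt hq]
      cases Bsp (pr x) xs <;> simp
    · rw [if_neg hlt, ih _ _ hq, Bsp_cons_ge x xs q hlt]

lemma scan_eq_find (n : String) (ms : List String) :
    pickA_scan n ms = ms.find? (fun m => PySem.Str.isIn n (PySem.Str.lower m)) := by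
  induction ms with
  | nil => rfl
  | cons m rest ih =>
    rw [pickA_scan]
    by_cases h : PySem.Str.isIn n (PySem.Str.lower m) = true
    · rw [if_pos h]
      exact (List.find?_cons_of_pos (p := fun m => PySem.Str.isIn n (PySem.Str.lower m)) h).symm
    · rw [if_neg h, ih]
      exact (List.find?_cons_of_neg (p := fun m => PySem.Str.isIn n (PySem.Str.lower m)) (by simpa using h)).symm

lemma outer3 (n1 n2 n3 : String) (L : List String) :
    pickA_outer [n1, n2, n3] L = or3 (pickA_scan n1 L) (pickA_scan n2 L) (pickA_scan n3 L) := by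
  cases h1 : pickA_scan n1 L <;> cases h2 : pickA_scan n2 L <;> cases h3 : pickA_scan n3 L <;>
    simp [pickA_outer, or3, h1, h2, h3]

lemma chain_eq (L : List String) :
    or3 (L.find? cP) (L.find? aP) (L.find? vP) = Bsp 3 L := by
  have h0 : L.find? (qp 0) = L.find? cP := by
    apply find?_congr_mem
    intro m _
    simp [qp, pr_char]
    split_ifs <;> simp_all
  rw [Bsp]
  simp only [if_pos (by omega : (0:Nat) < 3), if_pos (by omega : (1:Nat) < 3),
    if_pos (by omega : (2:Nat) < 3)]
  rw [h0]
  cases hc : L.find? cP with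
  | some m => simp [or3]
  | none =>
    have hcall : ∀ m ∈ L, cP m = false := by
      intro m hm
      simpa using List.find?_eq_none.mp hc m hm
    have h1 : L.find? (qp 1) = L.find? aP := by
      apply find?_congr_mem
      intro m hm
      simp [qp, pr_char, hcall m hm]
      split_ifs <;> simp_all
    rw [h1]
    cases ha : L.find? aP with
    | some m => simp [or3]
    | none =>
      have haall : ∀ m ∈ L, aP m = false := by
        intro m hm
        simpa using List.find?_eq_none.mp ha m hm
      have h2 : L.find? (qp 2) = L.find? vP := by
        apply find?_congr_mem
        intro m hm
        simp [qp, pr_char, hcall m hm, haall m hm]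
        cases vP m <;> simp
      rw [h2]

-- ===== VERDICT (by name: the statement is the Claim_ definition above) =====
theorem pick_default_py_spec : Claim_equal_pick_default_py := by
  intro models _
  unfold Spec_pick_default_py
  cases models with
  | nil => rfl
  | cons m0 rest =>
    rw [pick_default_py_alt, fold_char _ _ _ (by omega)]
    rw [pick_default_py]
    have houter : pickA_outer ["cua", "agent", "vision"] (m0 :: rest) =
        or3 ((m0 :: rest).find? cP) ((m0 :: rest).find? aP) ((m0 :: rest).find? vP) := by
      rw [outer3]; simp only [scan_eq_find]; rfl
    rw [houter, chain_eq]
    cases Bsp 3 (m0 :: rest) <;> simp
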